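-- pv_equiv track=rewrite | github.com/art777nn/sms_gateway | app/modem_handler.py | decode_gsm7bit
-- ===== SOURCE A (Python) =====
-- def decode_gsm7bit(encoded_message):
--     """Декодирует 7-битное сообщение в формате GSM."""
--     decoded_message = ""
--     n = len(encoded_message)
--
--     for i in range(n):
--         byte = encoded_message[i]
--         for bit in range(7):
--             if byte & (1 << bit):
--                 decoded_message += chr((383 + bit) if i * 7 + bit < n * 8 else 0)
--
--     return decoded_message
-- ===== SOURCE B (Python) =====
-- _TABLE = [''.join(chr(383 + bit) for bit in range(7) if v >> bit & 1)
--           for v in range(128)]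
--
-- def decode_gsm7bit(encoded_message):
--     return ''.join(_TABLE[byte & 0x7F] for byte in encoded_message)
-- ===== Notes on version B (the rewrite author's own statement) =====
-- stated objective: idiomatic
-- what changed: B precomputes a 128-entry string table indexed by byte & 0x7F, replacing A's per-byte inner 7-bit loop and character-by-character string concatenation with a single table lookup per byte joined in one pass.
import Mathlib
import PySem

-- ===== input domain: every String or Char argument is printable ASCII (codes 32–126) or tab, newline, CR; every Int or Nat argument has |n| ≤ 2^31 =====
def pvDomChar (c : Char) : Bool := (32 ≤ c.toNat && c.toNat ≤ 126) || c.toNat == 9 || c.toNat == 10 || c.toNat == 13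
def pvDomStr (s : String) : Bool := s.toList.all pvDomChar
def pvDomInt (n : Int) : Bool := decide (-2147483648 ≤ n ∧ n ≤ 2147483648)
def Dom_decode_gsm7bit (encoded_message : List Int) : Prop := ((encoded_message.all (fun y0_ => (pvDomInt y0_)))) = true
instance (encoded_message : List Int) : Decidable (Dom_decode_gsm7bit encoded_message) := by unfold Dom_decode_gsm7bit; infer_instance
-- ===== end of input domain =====

-- B replaces A's per-byte inner bit loop by a precomputed 128-entry table indexed by byte & 0x7F, joined in one pass.


-- ===== PORT A =====
def decode_gsm7bit (encoded_message : List Int) : String :=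
  let n : Int := encoded_message.length
  (PySem.List.pyRange 0 n).foldl (fun decoded_message i =>
    let byte := PySem.List.pyGetD encoded_message i 0
    (PySem.List.pyRange 0 7).foldl (fun acc bit =>
      if PySem.Int.band byte ((1 : Int) <<< bit) ≠ 0 then
        acc ++ String.ofList [Char.ofNat (if i * 7 + bit < n * 8 then (383 + bit).toNat else 0)]
      else acc) decoded_message) ""

-- ===== PORT B =====
def gsm7Table : List String :=
  (List.range 128).map (fun v =>
    String.ofList (((List.range 7).filter (fun bit => v >>> bit &&& 1 == 1)).map
      (fun bit => Char.ofNat (383 + bit))))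

def decode_gsm7bit_alt (encoded_message : List Int) : String :=
  PySem.Str.join "" (encoded_message.map (fun byte =>
    gsm7Table.getD (PySem.Int.band byte 127).toNat ""))

-- ===== PRECONDITION & SPEC =====
def Spec_decode_gsm7bit (encoded_message : List Int) (out : String) : Prop := out = decode_gsm7bit_alt encoded_message
instance (encoded_message : List Int) (out : String) : Decidable (Spec_decode_gsm7bit encoded_message out) := by unfold Spec_decode_gsm7bit; infer_instance

-- ===== CLAIM (what is proved, stated in full; the proofs are below) =====
def Claim_equal_decode_gsm7bit : Prop := ∀ (encoded_message : List Int), Dom_decode_gsm7bit encoded_message → Spec_decode_gsm7bit encoded_message (decode_gsm7bit encoded_message)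

-- ===== LEMMAS AND PROOFS =====

-- the characters A emits for one byte (guard-free form)
def chunkI (b : Int) : List Char :=
  ((PySem.List.pyRange 0 7).filter (fun bit =>
      decide (PySem.Int.band b ((1 : Int) <<< bit) ≠ 0))).map
    (fun bit => Char.ofNat (383 + bit).toNat)

theorem int_toNat_127 : (127 : Int).toNat = 127 := rfl

theorem one_shl (k : Int) (hk : 0 ≤ k) :
    (1 : Int) <<< k = ((2 ^ k.toNat : Nat) : Int) := by
  obtain ⟨n, rfl⟩ : ∃ n : Nat, k = (n : Int) := ⟨k.toNat, by omega⟩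
  rw [Int.shiftLeft_eq_mul_pow]
  simp

theorem and127_two_pow {k : Nat} (hk : k < 7) : 127 &&& 2 ^ k = 2 ^ k := by
  interval_cases k <;> decide

theorem natF' : ∀ k, k < 7 → ∀ r, r < 128 →
    (127 - r) &&& 2 ^ k = 2 ^ k - (2 ^ k &&& r) := by decide

theorem natF (m k : Nat) (hk : k < 7) :
    (127 - (127 &&& m)) &&& 2 ^ k = 2 ^ k - (2 ^ k &&& m) := by
  have h127 : (127 : Nat) &&& m = m % 128 := by
    rw [Nat.and_comm]
    simpa using Nat.and_two_pow_sub_one_eq_mod m 7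
  have hbit : (2 : Nat) ^ k &&& m = 2 ^ k &&& (m % 128) := by
    rw [Nat.and_comm ((2:Nat)^k) m, Nat.and_comm ((2:Nat)^k) (m % 128),
        Nat.and_two_pow, Nat.and_two_pow]
    have ht : (m % 128).testBit k = m.testBit k := by
      have := Nat.testBit_mod_two_pow m 7 k
      simpa [hk] using this
    rw [ht]
  rw [h127, hbit]
  exact natF' k hk (m % 128) (Nat.mod_lt _ (by norm_num))

theorem maskBit (b k : Int) (h0 : 0 ≤ k) (hk : k < 7) :
    PySem.Int.band b ((1 : Int) <<< k)
      = PySem.Int.band (PySem.Int.band b 127) ((1 : Int) <<< k) := by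
  have hkn : k.toNat < 7 := by omega
  rw [one_shl k h0]
  by_cases hb : 0 ≤ b
  · rw [PySem.Int.band_of_nonneg hb (by positivity),
        PySem.Int.band_of_nonneg hb (by norm_num : (0:Int) ≤ 127),
        PySem.Int.band_of_nonneg (by positivity) (by positivity)]
    simp only [Int.toNat_natCast, int_toNat_127]
    norm_cast
    rw [Nat.and_assoc, and127_two_pow hkn]
  · simp only [PySem.Int.band, hb, if_false,
      if_pos (by positivity : (0:Int) ≤ ((2 ^ k.toNat : Nat) : Int)),
      if_pos (by norm_num : (0:Int) ≤ (127:Int))]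
    simp only [Int.toNat_natCast, int_toNat_127]
    split_ifs with h
    · exact_mod_cast (natF (-b - 1).toNat k.toNat hkn).symm
    · exact absurd (by positivity) h

theorem maskRange (b : Int) : ∃ r : Nat, r < 128 ∧ PySem.Int.band b 127 = (r : Int) := by
  by_cases hb : 0 ≤ b
  · refine ⟨b.toNat &&& 127, ?_, ?_⟩
    · have h : b.toNat &&& 127 = b.toNat % 128 := by
        simpa using Nat.and_two_pow_sub_one_eq_mod b.toNat 7
      rw [h]; exact Nat.mod_lt _ (by norm_num)
    · rw [show (127 : Int) = ((127 : Nat) : Int) by norm_num,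
          PySem.Int.band_of_nonneg hb (by positivity)]
      norm_num [int_toNat_127]
  · refine ⟨127 - (127 &&& (-b - 1).toNat), ?_, ?_⟩
    · omega
    · simp only [PySem.Int.band, hb, if_false,
        if_pos (by norm_num : (0:Int) ≤ (127:Int))]
      norm_num [int_toNat_127]

set_option maxRecDepth 10000 in
theorem chunk_eq_of_lt : ∀ r : Nat, r < 128 →
    chunkI (r : Int) = (gsm7Table.getD r "").toList := by decide

theorem chunk_eq (b : Int) :
    chunkI b = (gsm7Table.getD (PySem.Int.band b 127).toNat "").toList := by
  obtain ⟨r, hr, hb⟩ := maskRange b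
  have hc : chunkI b = chunkI (r : Int) := by
    unfold chunkI
    congr 1
    apply List.filter_congr
    intro bit hbit
    rw [PySem.List.mem_pyRange_one] at hbit
    rw [maskBit b bit hbit.1 hbit.2, hb]
  rw [hc, hb, Int.toNat_natCast]
  exact chunk_eq_of_lt r hr

theorem strFold (ks : List Int) (p : Int → Bool) (c : Int → Char) (s : String) :
    ks.foldl (fun acc k => if p k then acc ++ String.ofList [c k] else acc) s
      = s ++ String.ofList ((ks.filter p).map c) := by
  induction ks generalizing s with
  | nil => simp
  | cons k ks ih =>
      by_cases h : p k
      · simp [h, ih, String.append_assoc, ← String.ofList_append]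
      · simp [h, ih]

theorem strCat (g : Int → List Char) (xs : List Int) (s : String) :
    xs.foldl (fun acc b => acc ++ String.ofList (g b)) s
      = s ++ String.ofList (xs.flatMap g) := by
  induction xs generalizing s with
  | nil => simp
  | cons x xs ih => simp [ih, String.append_assoc, ← String.ofList_append]

theorem join_empty (l : List (List Char)) : PySem.Chars.join [] l = l.flatten := by
  induction l with
  | nil => simp [PySem.Chars.join_nil]
  | cons a l ih =>
      cases l with
      | nil => simp [PySem.Chars.join, List.intercalate, List.intersperse]
      | cons b rest => rw [PySem.Chars.join_cons_cons]; simp_all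

theorem A_flat (xs : List Int) :
    decode_gsm7bit xs = String.ofList (xs.flatMap chunkI) := by
  unfold decode_gsm7bit
  rw [PySem.List.foldl_congr_mem _ _
      (fun decoded i =>
        (PySem.List.pyRange 0 7).foldl (fun acc bit =>
          if PySem.Int.band (PySem.List.pyGetD xs i 0) ((1 : Int) <<< bit) ≠ 0 then
            acc ++ String.ofList [Char.ofNat (383 + bit).toNat]
          else acc) decoded) ""
      ?_]
  · rw [PySem.List.foldl_pyRange_zero_pyGetD' xs 0
        (fun decoded byte =>
          (PySem.List.pyRange 0 7).foldl (fun acc bit =>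
            if PySem.Int.band byte ((1 : Int) <<< bit) ≠ 0 then
              acc ++ String.ofList [Char.ofNat (383 + bit).toNat]
            else acc) decoded) ""]
    rw [PySem.List.foldl_congr_mem _ _
        (fun acc b => acc ++ String.ofList (chunkI b)) "" ?_]
    · exact strCat chunkI xs ""
    · intro acc b _
      simpa [chunkI] using strFold (PySem.List.pyRange 0 7)
        (fun bit => decide (PySem.Int.band b ((1 : Int) <<< bit) ≠ 0))
        (fun bit => Char.ofNat (383 + bit).toNat) acc
  · intro acc i hi
    rw [PySem.List.mem_pyRange_one] at hi
    apply PySem.List.foldl_congr_mem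
    intro a bit hbit
    rw [PySem.List.mem_pyRange_one] at hbit
    have hg : i * 7 + bit < (xs.length : Int) * 8 := by omega
    rw [if_pos hg]

theorem B_flat (xs : List Int) :
    decode_gsm7bit_alt xs = String.ofList (xs.flatMap chunkI) := by
  have h : (decode_gsm7bit_alt xs).toList = xs.flatMap chunkI := by
    unfold decode_gsm7bit_alt
    rw [PySem.Str.toList_join]
    simp only [String.toList_empty]
    rw [join_empty, List.map_map]
    rw [show (String.toList ∘ fun byte =>
        gsm7Table.getD (PySem.Int.band byte 127).toNat "")
      = chunkI from funext (fun b => (chunk_eq b).symm)]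
    rw [List.flatMap_def]
  calc decode_gsm7bit_alt xs = String.ofList (decode_gsm7bit_alt xs).toList := by
        rw [String.ofList_toList]
    _ = _ := by rw [h]

-- ===== VERDICT (by name: the statement is the Claim_ definition above) =====
theorem decode_gsm7bit_spec : Claim_equal_decode_gsm7bit := by
  intro xs _
  unfold Spec_decode_gsm7bit
  rw [A_flat, B_flat]
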